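-- pv_equiv track=rewrite | github.com/pengdejia/noslot | AGIF-master/utils/make_mask.py | my_get_intent_slot
-- ===== SOURCE A (Python) =====
-- def my_get_intent_slot(lines):
--     texts, slots, intents = [], [], []
--     text, slot = [], []
--
--     for line in lines:
--         items = line.strip().split()
--         if len(items) == 1:
--             texts.append(text)
--             slots.append(slot)
--             intents.append(items)
--
--             # clear buffer lists.
--             text, slot = [], []
--
--         elif len(items) == 2:
--             text.append(items[0].strip())
--             slot.append(items[1].strip())
--
--     return texts, slots, intents
-- ===== SOURCE B (Python) =====
-- def my_get_intent_slot(lines):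
--     # Two-phase parse: tokenize every line once, then walk the token lists and,
--     # at each 1-token (intent) line, slice out the segment since the previous
--     # boundary, keep its 2-token lines and project word/slot columns from it.
--     # Lines after the last boundary belong to no finished segment.
--     toks = [line.strip().split() for line in lines]
--     texts, slots, intents = [], [], []
--     start = 0
--     for cut, t in enumerate(toks):
--         if len(t) == 1:
--             body = [u for u in toks[start:cut] if len(u) == 2]
--             texts.append([u[0].strip() for u in body])
--             slots.append([u[1].strip() for u in body])
--             intents.append(t)
--             start = cut + 1
--     return texts, slots, intents
-- ===== Notes on version B (the rewrite author's own statement) =====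
-- stated objective: alternative
-- what changed: A accumulates word/slot buffers line by line and flushes them at each 1-token line; B first tokenizes all lines, then acts only at the 1-token boundaries, slicing the segment since the previous boundary and projecting its 2-token lines into the word and slot columns.
import Mathlib
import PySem

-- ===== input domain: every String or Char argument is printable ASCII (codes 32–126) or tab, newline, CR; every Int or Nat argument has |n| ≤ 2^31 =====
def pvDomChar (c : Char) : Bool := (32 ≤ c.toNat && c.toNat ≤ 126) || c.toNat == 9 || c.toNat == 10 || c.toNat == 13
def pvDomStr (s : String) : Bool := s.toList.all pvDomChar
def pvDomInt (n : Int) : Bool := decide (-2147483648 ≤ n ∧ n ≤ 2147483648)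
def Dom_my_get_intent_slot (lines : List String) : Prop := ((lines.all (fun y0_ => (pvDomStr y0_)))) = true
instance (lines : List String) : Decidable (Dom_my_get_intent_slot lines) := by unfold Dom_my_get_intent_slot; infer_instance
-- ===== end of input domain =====

-- B replaces A's line-by-line buffer accumulation by a tokenize-first pass that acts
-- only at the 1-token boundary lines, slicing and projecting each segment (objective: alternative).

-- ===== PORT A =====
-- A: one left fold; state = (finished (texts, slots, intents), current (text, slot) buffers).
def pvStepA
    (st : (List (List String) × List (List String) × List (List String)) × (List String × List String))
    (line : String) :
    (List (List String) × List (List String) × List (List String)) × (List String × List String) :=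
  let items := PySem.Str.split₀ (PySem.Str.strip line)
  match items with
  | [_] => ((st.1.1 ++ [st.2.1], st.1.2.1 ++ [st.2.2], st.1.2.2 ++ [items]), ([], []))
  | [a, b] => (st.1, (st.2.1 ++ [PySem.Str.strip a], st.2.2 ++ [PySem.Str.strip b]))
  | _ => st

def my_get_intent_slot (lines : List String) :
    List (List String) × List (List String) × List (List String) :=
  (lines.foldl pvStepA (([], [], []), ([], []))).1

-- ===== PORT B =====
-- B: fold over `enumerate toks`; state = ((texts, slots, intents), start); at a 1-token
-- line the slice toks[start:cut] is filtered to the 2-token lines and projected.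
-- u[0] is ported as u.headI and u[1] as u.getD 1 "" — exact, since u has length 2 here.
def pvStepB (toks : List (List String))
    (st : (List (List String) × List (List String) × List (List String)) × Int)
    (p : Int × List String) :
    (List (List String) × List (List String) × List (List String)) × Int :=
  if p.2.length == 1 then
    let body := (PySem.List.slice toks (some st.2) (some p.1)).filter (fun u => u.length == 2)
    ((st.1.1 ++ [body.map (fun u => PySem.Str.strip u.headI)],
      st.1.2.1 ++ [body.map (fun u => PySem.Str.strip (u.getD 1 ""))],
      st.1.2.2 ++ [p.2]), p.1 + 1)
  else st

def my_get_intent_slot_alt (lines : List String) :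
    List (List String) × List (List String) × List (List String) :=
  let toks := lines.map (fun l => PySem.Str.split₀ (PySem.Str.strip l))
  ((PySem.List.enumerate toks).foldl (pvStepB toks) (([], [], []), 0)).1

-- ===== PRECONDITION & SPEC =====
def Spec_my_get_intent_slot (lines : List String) (out : List (List String) × List (List String) × List (List String)) : Prop := out = my_get_intent_slot_alt lines
instance (lines : List String) (out : List (List String) × List (List String) × List (List String)) : Decidable (Spec_my_get_intent_slot lines out) := by unfold Spec_my_get_intent_slot; infer_instance

-- ===== CLAIM (what is proved, stated in full; the proofs are below) =====
def Claim_equal_my_get_intent_slot : Prop := ∀ (lines : List String), Dom_my_get_intent_slot lines → Spec_my_get_intent_slot lines (my_get_intent_slot lines)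

-- ===== LEMMAS AND PROOFS =====

-- proof-only middle form: the list of (text, slot, intent) segments, built from the right
def pvSegments : List (List String) → List (List String) × List (List String) × List (List String)
  | [] => ([], [], [])
  | t :: rest =>
    let r := pvSegments rest
    match t with
    | [_] => ([] :: r.1, [] :: r.2.1, t :: r.2.2)
    | [a, b] =>
      match r with
      | (t0 :: ts, s0 :: ss, is) =>
        ((PySem.Str.strip a :: t0) :: ts, (PySem.Str.strip b :: s0) :: ss, is)
      | _ => r
    | _ => r

-- how A's accumulated state relates to the segments of the remaining input
def pvMerge (T S I : List (List String)) (text slot : List String)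
    (r : List (List String) × List (List String) × List (List String)) :
    List (List String) × List (List String) × List (List String) :=
  match r with
  | (t0 :: ts, s0 :: ss, is) => (T ++ (text ++ t0) :: ts, S ++ (slot ++ s0) :: ss, I ++ is)
  | _ => (T, S, I)

-- how B's accumulated state relates: the pending 2-token lines buf still await projection
def pvMergeB (T S I : List (List String)) (buf : List (List String))
    (r : List (List String) × List (List String) × List (List String)) :
    List (List String) × List (List String) × List (List String) :=
  match r with
  | (t0 :: ts, s0 :: ss, is) =>
    (T ++ (buf.map (fun u => PySem.Str.strip u.headI) ++ t0) :: ts,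
     S ++ (buf.map (fun u => PySem.Str.strip (u.getD 1 "")) ++ s0) :: ss, I ++ is)
  | _ => (T, S, I)

lemma pvSegments_len (toks : List (List String)) :
    (pvSegments toks).1.length = (pvSegments toks).2.2.length ∧
    (pvSegments toks).2.1.length = (pvSegments toks).2.2.length := by
  induction toks with
  | nil => simp [pvSegments]
  | cons t rest ih =>
    simp only [pvSegments]
    rcases h : pvSegments rest with ⟨ts, ss, is⟩
    rw [h] at ih
    match t with
    | [] => simpa using ih
    | [x] => simpa using ih
    | [a, b] =>
      match ts, ss, is with
      | [], _, _ => simpa using ih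
      | _ :: _, [], _ => simpa using ih
      | _ :: _, _ :: _, [] => simp at ih
      | t0 :: ts', s0 :: ss', i0 :: is' => simpa using ih
    | _ :: _ :: _ :: _ => simpa using ih

lemma pvSegments_shape (toks : List (List String)) :
    pvSegments toks = ([], [], []) ∨
    ∃ t0 ts s0 ss i0 is, pvSegments toks = (t0 :: ts, s0 :: ss, i0 :: is) := by
  have hlen := pvSegments_len toks
  rcases h : pvSegments toks with ⟨ts, ss, is⟩
  rw [h] at hlen
  obtain ⟨h1, h2⟩ := hlen
  match ts, ss, is with
  | [], ss, is =>
    left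
    have : is = [] := by simpa using h1.symm
    subst this
    have : ss = [] := by simpa [List.length_eq_zero_iff] using h2
    subst this
    rfl
  | t0 :: ts', s0 :: ss', i0 :: is' =>
    right; exact ⟨t0, ts', s0, ss', i0, is', rfl⟩
  | t0 :: ts', s0 :: ss', [] => simp at h1
  | t0 :: ts', [], is => simp at h1 h2; omega

lemma pvLoop_eq (lines : List String) (T S I : List (List String)) (text slot : List String) :
    (List.foldl pvStepA ((T, S, I), (text, slot)) lines).1 =
      pvMerge T S I text slot
        (pvSegments (lines.map (fun l => PySem.Str.split₀ (PySem.Str.strip l)))) := by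
  induction lines generalizing T S I text slot with
  | nil => simp [pvMerge, pvSegments]
  | cons line rest ih =>
    simp only [List.foldl_cons, List.map_cons, pvSegments]
    have hshape := pvSegments_shape (rest.map (fun l => PySem.Str.split₀ (PySem.Str.strip l)))
    simp only [pvStepA]
    rcases hit : PySem.Str.split₀ (PySem.Str.strip line) with _ | ⟨x, _ | ⟨y, _ | ⟨z, w⟩⟩⟩ <;>
      simp only [ih] <;>
      rcases hshape with h | ⟨t0, ts, s0, ss, i0, is, h⟩ <;>
      simp [h, pvMerge]

-- the pending slice grows by one token list when the cursor passes a non-boundary line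
lemma pvSlice_snoc (F : List (List String)) (t : List String) (rest : List (List String))
    (k start : Nat) (hF : F.drop k = t :: rest) (hsk : start ≤ k) :
    (F.drop start).take (k + 1 - start) = (F.drop start).take (k - start) ++ [t] := by
  have hk : k < F.length := by
    by_contra h
    simp [List.drop_eq_nil_of_le (le_of_not_gt h)] at hF
  have hdd : (F.drop start).drop (k - start) = t :: rest := by
    rw [List.drop_drop, Nat.add_sub_cancel' hsk]; exact hF
  have hsplit : (F.drop start).take (k - start) ++ (t :: rest) = F.drop start := by
    rw [← hdd]; exact List.take_append_drop _ _
  have hlen : ((F.drop start).take (k - start)).length = k - start := by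
    rw [List.length_take, List.length_drop]; omega
  calc (F.drop start).take (k + 1 - start)
      = ((F.drop start).take (k - start) ++ (t :: rest)).take (k - start + 1) := by
        rw [hsplit]; congr 1; omega
    _ = (F.drop start).take (k - start) ++ (t :: rest).take 1 := by
        rw [List.take_append, hlen, List.take_of_length_le (by omega)]
        congr 1; congr 1; omega
    _ = (F.drop start).take (k - start) ++ [t] := by simp

lemma pvLoopB_eq (F : List (List String)) (rest : List (List String)) (k start : Nat)
    (T S I : List (List String)) (hF : F.drop k = rest) (hsk : start ≤ k) :
    ((PySem.List.enumerate rest (k : Int)).foldl (pvStepB F) ((T, S, I), (start : Int))).1 =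
      pvMergeB T S I (((F.drop start).take (k - start)).filter (fun u => u.length == 2))
        (pvSegments rest) := by
  induction rest generalizing k start T S I with
  | nil =>
    simp [PySem.List.enumerate_nil, pvSegments, pvMergeB]
  | cons t rest' ih =>
    rw [PySem.List.enumerate_cons, List.foldl_cons]
    have hF' : F.drop (k + 1) = rest' := by
      have h2 := congrArg List.tail hF
      rw [List.tail_drop] at h2
      simpa using h2
    have hsnoc := pvSlice_snoc F t rest' k start hF hsk
    have hshape := pvSegments_shape rest'
    simp only [pvSegments]
    rcases t with _ | ⟨a, _ | ⟨b, _ | ⟨c, w⟩⟩⟩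
    · -- 0 tokens: skipped, filtered out of the pending slice
      simp only [pvStepB, List.length_nil]
      norm_num
      rw [show ((k : Int) + 1) = ((k + 1 : Nat) : Int) by push_cast; ring,
        ih (k + 1) start T S I hF' (by omega), hsnoc]
      simp
    · -- 1 token: boundary, flush the pending slice
      simp only [pvStepB, List.length_cons, List.length_nil]
      norm_num
      rw [show ((k : Int) + 1) = ((k + 1 : Nat) : Int) by push_cast; ring,
        PySem.List.slice_natCast,
        ih (k + 1) (k + 1) _ _ _ hF' (by omega)]
      rcases hshape with h | ⟨t0, ts, s0, ss, i0, is, h⟩ <;> simp [h, pvMergeB]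
    · -- 2 tokens: kept in the pending slice
      simp only [pvStepB, List.length_cons, List.length_nil]
      norm_num
      rw [show ((k : Int) + 1) = ((k + 1 : Nat) : Int) by push_cast; ring,
        ih (k + 1) start T S I hF' (by omega), hsnoc]
      rcases hshape with h | ⟨t0, ts, s0, ss, i0, is, h⟩ <;>
        simp [h, pvMergeB, List.headI, List.getD]
    · -- ≥ 3 tokens: skipped, filtered out of the pending slice
      simp only [pvStepB, List.length_cons]
      norm_num
      rw [show ((k : Int) + 1) = ((k + 1 : Nat) : Int) by push_cast; ring,
        ih (k + 1) start T S I hF' (by omega), hsnoc]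
      rcases hshape with h | ⟨t0, ts, s0, ss, i0, is, h⟩ <;> simp [h, pvMergeB]

-- ===== VERDICT (by name: the statement is the Claim_ definition above) =====
theorem my_get_intent_slot_spec : Claim_equal_my_get_intent_slot := by
  intro lines _
  show my_get_intent_slot lines = my_get_intent_slot_alt lines
  unfold my_get_intent_slot my_get_intent_slot_alt
  rw [pvLoop_eq]
  rw [show (0 : Int) = ((0 : Nat) : Int) by norm_num,
    pvLoopB_eq (lines.map (fun l => PySem.Str.split₀ (PySem.Str.strip l))) _ 0 0 [] [] []
      (by simp) (le_refl 0)]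
  rcases pvSegments_shape (lines.map (fun l => PySem.Str.split₀ (PySem.Str.strip l))) with h |
    ⟨t0, ts, s0, ss, i0, is, h⟩ <;> simp [h, pvMerge, pvMergeB]
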